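-- pv_equiv track=rewrite | github.com/Aamir7693/Opti-Q | old/main.py | canonical_representation
-- ===== SOURCE A (Python) =====
-- import itertools
--
-- def canonical_representation(adj_matrix, k):
--     """Compute highest-value adjacency bitmask among all isomorphic labelings of a DAG."""
--     nodes = list(range(k))
--     best_mask = -1
--     for perm in itertools.permutations(nodes):
--         # Check if perm is a valid topological order (no edge goes from later to earlier in this perm)
--         valid_topo = True
--         pos = {node: idx for idx, node in enumerate(perm)}
--         for i in range(k):
--             for j in range(k):
--                 if adj_matrix[i][j] == 1 and pos[i] > pos[j]:
--                     valid_topo = False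
--                     break
--             if not valid_topo:
--                 break
--         if not valid_topo:
--             continue
--         # Build adjacency in new labeling and compute bitmask
--         new_mask = 0
--         bit_index = 0
--         for a in range(k - 1):
--             for b in range(a + 1, k):
--                 # Map original nodes corresponding to new labels a, b
--                 # Find original nodes x,y such that perm.index(x)=a, perm.index(y)=b
--                 x = perm[a];
--                 y = perm[b]
--                 if adj_matrix[x][y] == 1:
--                     new_mask |= (1 << bit_index)
--                 bit_index += 1
--         if new_mask > best_mask:
--             best_mask = new_mask
--     return best_mask
-- ===== SOURCE B (Python) =====
-- def canonical_representation(adj_matrix, k):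
--     """Backtracking over valid topological orders (with pruning) instead of filtering all k! permutations."""
--     def selections(lst):
--         # all (chosen, rest-with-order-preserved) pairs, in itertools.permutations order
--         if not lst:
--             return []
--         x, rest = lst[0], lst[1:]
--         return [(x, rest)] + [(y, [x] + r) for (y, r) in selections(rest)]
--
--     def ready(v, remaining):
--         # v may be placed next: no other remaining node has an edge into v
--         return all(adj_matrix[u][v] != 1 for u in remaining if u != v)
--
--     def mask_of(order):
--         m = 0
--         bit = 0
--         n = len(order)
--         for a in range(n - 1):
--             for b in range(a + 1, n):
--                 if adj_matrix[order[a]][order[b]] == 1: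
--                     m |= 1 << bit
--                 bit += 1
--         return m
--
--     def go(placed, remaining, best):
--         if not remaining:
--             m = mask_of(placed)
--             return m if m > best else best
--         for v, rest in selections(remaining):
--             if ready(v, remaining):
--                 best = go(placed + [v], rest, best)
--         return best
--
--     return go([], list(range(k)), -1)
-- ===== Notes on version B (the rewrite author's own statement) =====
-- stated objective: faster
-- what changed: Replaced the enumerate-all-k!-permutations-and-filter loop with recursive backtracking that extends only valid topological prefixes (a node is placed only when no still-remaining node has an edge into it), computing the bitmask only at complete valid orders.
-- outside the precondition, e.g. on canonical_representation([[0, 1], [1]], 2): A returns -1, B returns -1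
import Mathlib
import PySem

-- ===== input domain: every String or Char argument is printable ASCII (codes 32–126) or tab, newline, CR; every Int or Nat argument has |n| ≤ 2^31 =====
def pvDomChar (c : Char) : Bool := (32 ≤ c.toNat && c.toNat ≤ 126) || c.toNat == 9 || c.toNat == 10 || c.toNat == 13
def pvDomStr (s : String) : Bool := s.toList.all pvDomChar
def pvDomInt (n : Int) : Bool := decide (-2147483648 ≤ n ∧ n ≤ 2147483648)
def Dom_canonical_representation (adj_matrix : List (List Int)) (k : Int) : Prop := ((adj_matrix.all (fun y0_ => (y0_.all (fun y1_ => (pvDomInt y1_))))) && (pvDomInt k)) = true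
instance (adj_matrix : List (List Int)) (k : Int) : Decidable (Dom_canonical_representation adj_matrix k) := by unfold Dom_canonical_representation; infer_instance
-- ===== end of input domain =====

-- B replaces A's filter-all-k!-permutations loop by backtracking that extends only valid
-- topological prefixes; equivalence of the two ports is proved on Pre_ (a full k×k matrix).


-- ===== PORT A =====

-- adj_matrix[i][j] (both indices are in range on every admitted input; default never read there)
def pvCell (adj : List (List Int)) (i j : Int) : Int :=
  PySem.List.pyGetD (PySem.List.pyGetD adj i []) j 0

-- all (first, rest-with-order-kept) choices of one element of l, in order (helper for both ports)
def pvSelects {α : Type} : List α → List (α × List α)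
  | [] => []
  | x :: xs => (x, xs) :: (pvSelects xs).map (fun p => (p.1, x :: p.2))

theorem pvSelects_length {α : Type} : ∀ (l : List α) (p : α × List α), p ∈ pvSelects l → p.2.length + 1 = l.length := by
  intro l
  induction l with
  | nil => intro p h; simp [pvSelects] at h
  | cons x xs ih =>
    intro p h
    simp only [pvSelects, List.mem_cons, List.mem_map] at h
    rcases h with h | ⟨q, hq, rfl⟩
    · subst h; simp
    · have := ih q hq; simp [List.length_cons]; omega

-- hand port of itertools.permutations(l) (exact output order: pick each element first, recurse)
def pvPerms {α : Type} : List α → List (List α)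
  | [] => [[]]
  | x :: xs =>
    (pvSelects (x :: xs)).attach.flatMap (fun q => (pvPerms q.1.2).map (q.1.1 :: ·))
termination_by l => l.length
decreasing_by
  have := pvSelects_length (x :: xs) q.1 q.2
  simp at this ⊢; omega

-- A's validity check for one perm: the pos dict, then the nested loops ('break' is ported as
-- an absorbing fold: once False the state never changes, same value)
def pvValidA (adj : List (List Int)) (k : Int) (perm : List Int) : Bool :=
  let pos := (PySem.List.enumerate perm 0).foldl (fun d p => d.insert p.2 p.1) PySem.Dict.empty
  (PySem.List.pyRange 0 k 1).foldl (fun v i =>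
      (PySem.List.pyRange 0 k 1).foldl (fun v2 j =>
        v2 && !((pvCell adj i j == 1) && decide (pos.getD i 0 > pos.getD j 0))) v) true

-- A's mask loops; 1 << bit (bit ≥ 0 always) is (1 : Int) <<< bit.toNat; |= is PySem.Int.bor
def pvMaskA (adj : List (List Int)) (k : Int) (perm : List Int) : Int × Int :=
  (PySem.List.pyRange 0 (k - 1) 1).foldl (fun (s : Int × Int) a =>
      (PySem.List.pyRange (a + 1) k 1).foldl (fun (s : Int × Int) b =>
        ((if pvCell adj (PySem.List.pyGetD perm a 0) (PySem.List.pyGetD perm b 0) == 1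
          then PySem.Int.bor s.1 ((1 : Int) <<< s.2.toNat) else s.1), s.2 + 1)) s) ((0 : Int), (0 : Int))

-- one iteration of A's outer "for perm in permutations(nodes)" loop
def pvStepA (adj : List (List Int)) (k : Int) (best_mask : Int) (perm : List Int) : Int :=
  let valid_topo := pvValidA adj k perm
  if !valid_topo then best_mask
  else
    let mb := pvMaskA adj k perm
    if mb.1 > best_mask then mb.1 else best_mask

def canonical_representation (adj_matrix : List (List Int)) (k : Int) : Int :=
  let nodes := PySem.List.pyRange 0 k 1
  (pvPerms nodes).foldl (fun best_mask perm => pvStepA adj_matrix k best_mask perm) (-1)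

-- ===== PORT B =====

-- B.ready: v may be placed next (no other remaining node has an edge into v)
def pvReady (adj : List (List Int)) (v : Int) (remaining : List Int) : Bool :=
  (remaining.filter (fun u => u != v)).all (fun u => pvCell adj u v != 1)

-- B.mask_of
def pvMaskOf (adj : List (List Int)) (order : List Int) : Int :=
  let n : Int := order.length
  ((PySem.List.pyRange 0 (n - 1) 1).foldl (fun (s : Int × Int) a =>
      (PySem.List.pyRange (a + 1) n 1).foldl (fun (s : Int × Int) b =>
        ((if pvCell adj (PySem.List.pyGetD order a 0) (PySem.List.pyGetD order b 0) == 1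
          then PySem.Int.bor s.1 ((1 : Int) <<< s.2.toNat) else s.1), s.2 + 1)) s) ((0 : Int), (0 : Int))).1

-- B.go
def pvGo (adj : List (List Int)) (placed remaining : List Int) (best : Int) : Int :=
  if remaining = [] then
    let m := pvMaskOf adj placed
    if m > best then m else best
  else
    (pvSelects remaining).attach.foldl
      (fun b q => if pvReady adj q.1.1 remaining then pvGo adj (placed ++ [q.1.1]) q.1.2 b else b) best
termination_by remaining.length
decreasing_by
  have := pvSelects_length remaining q.1 q.2
  omega

def canonical_representation_alt (adj_matrix : List (List Int)) (k : Int) : Int :=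
  pvGo adj_matrix [] (PySem.List.pyRange 0 k 1) (-1)

-- ===== PRECONDITION & SPEC =====
-- Pre_: the matrix has a full k×k block. Slightly narrower than A's exact return set: on a
-- ragged matrix whether A raises IndexError depends on which validity loops break early; the
-- closed form excludes all matrices without the k×k block A's loops address.
def Pre_canonical_representation (adj_matrix : List (List Int)) (k : Int) : Prop :=
  k ≤ (adj_matrix.length : Int) ∧ ∀ row ∈ adj_matrix.take k.toNat, k ≤ (row.length : Int)
instance (adj_matrix : List (List Int)) (k : Int) : Decidable (Pre_canonical_representation adj_matrix k) := by unfold Pre_canonical_representation; infer_instance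

def pvWitness_canonical_representation : List (List Int) × Int := ([[0, 1], [0, 0]], 2)

def Spec_canonical_representation (adj_matrix : List (List Int)) (k : Int) (out : Int) : Prop := out = canonical_representation_alt adj_matrix k
instance (adj_matrix : List (List Int)) (k : Int) (out : Int) : Decidable (Spec_canonical_representation adj_matrix k out) := by unfold Spec_canonical_representation; infer_instance

-- ===== CLAIM (what is proved, stated in full; the proofs are below) =====
def Claim_equal_canonical_representation : Prop := ∀ (adj_matrix : List (List Int)) (k : Int), Dom_canonical_representation adj_matrix k → Pre_canonical_representation adj_matrix k → Spec_canonical_representation adj_matrix k (canonical_representation adj_matrix k)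

-- ===== LEMMAS AND PROOFS =====

-- readiness as a proposition (membership-only in its remaining argument)
def pvReadyP (adj : List (List Int)) (v : Int) (S : List Int) : Prop :=
  ∀ u ∈ S, u ≠ v → pvCell adj u v ≠ 1

theorem pvReady_iff (adj : List (List Int)) (v : Int) (S : List Int) :
    pvReady adj v S = true ↔ pvReadyP adj v S := by
  simp only [pvReady, pvReadyP, List.all_eq_true, List.mem_filter, bne_iff_ne, ne_eq, and_imp]

-- "every step of the prefix was ready when it was placed" (R = remaining after the prefix)
def pvOkSteps (adj : List (List Int)) : List Int → List Int → Prop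
  | [], _ => True
  | w :: p, R => pvReadyP adj w (p ++ R) ∧ pvOkSteps adj p R

theorem pvReadyP_congr (adj : List (List Int)) (v : Int) {S S' : List Int}
    (h : ∀ u, u ∈ S ↔ u ∈ S') : pvReadyP adj v S ↔ pvReadyP adj v S' := by
  unfold pvReadyP
  constructor
  · intro hr u hu hne; exact hr u ((h u).mpr hu) hne
  · intro hr u hu hne; exact hr u ((h u).mp hu) hne

theorem pvOkSteps_congr (adj : List (List Int)) : ∀ (p : List Int) {R R' : List Int},
    (∀ u, u ∈ R ↔ u ∈ R') → (pvOkSteps adj p R ↔ pvOkSteps adj p R') := by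
  intro p
  induction p with
  | nil => intro R R' _; simp [pvOkSteps]
  | cons w p ih =>
    intro R R' h
    simp only [pvOkSteps]
    have hm : ∀ u, u ∈ p ++ R ↔ u ∈ p ++ R' := by
      intro u; simp only [List.mem_append, h u]
    exact and_congr (pvReadyP_congr adj w hm) (ih h)

theorem pvOkSteps_append (adj : List (List Int)) : ∀ (p : List Int) (v : Int) (R : List Int),
    pvOkSteps adj (p ++ [v]) R ↔ pvOkSteps adj p (v :: R) ∧ pvReadyP adj v R := by
  intro p
  induction p with
  | nil => intro v R; simp [pvOkSteps, and_comm]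
  | cons w p ih =>
    intro v R
    simp only [List.cons_append, pvOkSteps, List.append_assoc,
      List.nil_append, ih, and_assoc]

theorem pvOkSteps_middle (adj : List (List Int)) : ∀ (p : List Int) (w : Int) (q R : List Int),
    pvOkSteps adj (p ++ w :: q) R → pvReadyP adj w (q ++ R) := by
  intro p
  induction p with
  | nil => intro w q R h; exact h.1
  | cons x p ih => intro w q R h; exact ih w q R h.2

-- every output of pvPerms is a permutation of the input
theorem pvSelects_perm {α : Type} : ∀ (l : List α) (p : α × List α), p ∈ pvSelects l → (p.1 :: p.2).Perm l := by
  intro l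
  induction l with
  | nil => intro p h; simp [pvSelects] at h
  | cons x xs ih =>
    intro p h
    simp only [pvSelects, List.mem_cons, List.mem_map] at h
    rcases h with h | ⟨q, hq, rfl⟩
    · subst h; exact List.Perm.refl _
    · exact (List.Perm.swap x q.1 q.2).trans ((ih q hq).cons x)

theorem pvPerms_perm {α : Type} : ∀ (l : List α) (σ : List α), σ ∈ pvPerms l → σ.Perm l := by
  intro l
  induction hn : l.length using Nat.strong_induction_on generalizing l with
  | _ n ih =>
    cases l with
    | nil =>
      intro σ hσ; simp only [pvPerms, List.mem_singleton] at hσ; subst hσ; exact List.Perm.refl _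
    | cons x xs =>
      intro σ hσ
      rw [pvPerms] at hσ
      simp only [List.mem_flatMap, List.mem_map, List.mem_attach, true_and] at hσ
      obtain ⟨q, τ, hτ, rfl⟩ := hσ
      have hql := pvSelects_length (x :: xs) q.1 q.2
      have hlt : q.1.2.length < n := by subst hn; simp at hql ⊢; omega
      have hτp := ih q.1.2.length hlt q.1.2 rfl τ hτ
      exact (hτp.cons q.1.1).trans (pvSelects_perm (x :: xs) q.1 q.2)

-- generic fold shapes
theorem pvFoldl_and {α : Type} (g : α → Bool) : ∀ (l : List α) (b : Bool),
    l.foldl (fun v x => v && g x) b = (b && l.all g) := by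
  intro l
  induction l with
  | nil => intro b; simp
  | cons x xs ih => intro b; simp [List.foldl_cons, ih, Bool.and_assoc]

theorem pvFoldl_and2 {α β : Type} (g : α → β → Bool) (L2 : List β) : ∀ (L1 : List α) (b : Bool),
    L1.foldl (fun v i => L2.foldl (fun v2 j => v2 && g i j) v) b = (b && L1.all (fun i => L2.all (g i))) := by
  intro L1
  induction L1 with
  | nil => intro b; simp
  | cons x xs ih =>
    intro b
    rw [List.foldl_cons, pvFoldl_and, ih]
    simp [Bool.and_assoc]

theorem pvFoldl_flatMap {α β γ : Type} (f : γ → β → γ) (g : α → List β) :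
    ∀ (l : List α) (b : γ), (l.flatMap g).foldl f b = l.foldl (fun b x => (g x).foldl f b) b := by
  intro l
  induction l with
  | nil => intro b; simp
  | cons x xs ih => intro b; simp [List.flatMap_cons, List.foldl_append, ih]

theorem pvFoldl_fix {α β : Type} (f : β → α → β) :
    ∀ (l : List α) (b : β), (∀ x ∈ l, ∀ acc, f acc x = acc) → l.foldl f b = b := by
  intro l
  induction l with
  | nil => intro b _; rfl
  | cons x xs ih =>
    intro b h
    rw [List.foldl_cons, h x (List.mem_cons_self) b]
    exact ih b (fun y hy => h y (List.mem_cons_of_mem x hy))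

-- the position dictionary of A is idxOf
theorem pvPosDict_not_mem : ∀ (l : List Int) (s : Int) (d : PySem.Dict Int Int) (i : Int),
    i ∉ l →
    ((PySem.List.enumerate l s).foldl (fun d p => d.insert p.2 p.1) d).get? i = d.get? i := by
  intro l
  induction l with
  | nil => intro s d i _; simp [PySem.List.enumerate_nil]
  | cons x xs ih =>
    intro s d i hi
    rw [PySem.List.enumerate_cons, List.foldl_cons]
    have hix : i ≠ x := fun h => hi (h ▸ List.mem_cons_self)
    rw [ih (s + 1) _ i (fun h => hi (List.mem_cons_of_mem x h))]
    exact PySem.Dict.get?_insert_of_ne _ _ hix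

theorem pvPosDict_get? : ∀ (l : List Int) (s : Int) (d : PySem.Dict Int Int) (i : Int),
    l.Nodup → i ∈ l →
    ((PySem.List.enumerate l s).foldl (fun d p => d.insert p.2 p.1) d).get? i = some (s + l.idxOf i) := by
  intro l
  induction l with
  | nil => intro s d i _ h; simp at h
  | cons x xs ih =>
    intro s d i hnd hi
    rw [PySem.List.enumerate_cons, List.foldl_cons]
    by_cases hix : i = x
    · subst hix
      have hnx : i ∉ xs := (List.nodup_cons.mp hnd).1
      rw [pvPosDict_not_mem xs (s + 1) _ i hnx, PySem.Dict.get?_insert_self,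
        List.idxOf_cons_self]
      simp
    · have hixs : i ∈ xs := by
        rcases List.mem_cons.mp hi with h | h
        · exact absurd h hix
        · exact h
      rw [ih (s + 1) _ i (List.nodup_cons.mp hnd).2 hixs,
        List.idxOf_cons_ne _ (fun h => hix h.symm)]
      congr 1
      push_cast [Nat.succ_eq_add_one]
      ring

theorem pvPosD (π : List Int) (hnd : π.Nodup) (i : Int) (hi : i ∈ π) :
    ((PySem.List.enumerate π 0).foldl (fun d p => d.insert p.2 p.1) PySem.Dict.empty).getD i 0 =
      (π.idxOf i : Int) := by
  rw [PySem.Dict.getD_eq_get?_getD, pvPosDict_get? π 0 _ i hnd hi]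
  simp

-- characterisation of A's validity loops
theorem pvValidA_iff (adj : List (List Int)) (k : Int) (perm : List Int) :
    pvValidA adj k perm = true ↔
      ∀ i ∈ PySem.List.pyRange 0 k 1, ∀ j ∈ PySem.List.pyRange 0 k 1,
        ¬(pvCell adj i j = 1 ∧
          ((PySem.List.enumerate perm 0).foldl (fun d p => d.insert p.2 p.1) PySem.Dict.empty).getD i 0 >
          ((PySem.List.enumerate perm 0).foldl (fun d p => d.insert p.2 p.1) PySem.Dict.empty).getD j 0) := by
  unfold pvValidA
  rw [pvFoldl_and2]
  simp only [Bool.true_and, List.all_eq_true, Bool.not_eq_eq_eq_not, Bool.not_true,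
    Bool.and_eq_false_imp, decide_eq_false_iff_not, beq_iff_eq, not_and, not_lt, gt_iff_lt]

-- valid ↔ all steps ready, for a full permutation of range(k)
theorem pvValidA_of_okSteps (adj : List (List Int)) (k : Int) (placed : List Int)
    (hp : placed.Perm (PySem.List.pyRange 0 k 1)) (hok : pvOkSteps adj placed []) :
    pvValidA adj k placed = true := by
  rw [pvValidA_iff]
  rintro i hi j hj ⟨h1, h2⟩
  have hnd : placed.Nodup := hp.nodup_iff.mpr (PySem.List.nodup_pyRange_one 0 k)
  have hip : i ∈ placed := hp.mem_iff.mpr hi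
  have hjp : j ∈ placed := hp.mem_iff.mpr hj
  rw [pvPosD placed hnd i hip, pvPosD placed hnd j hjp] at h2
  have hnl : placed.idxOf j < placed.length := List.idxOf_lt_length_of_mem hjp
  have hdec : placed = placed.take (placed.idxOf j) ++ j :: placed.drop (placed.idxOf j + 1) := by
    conv_lhs => rw [← List.take_append_drop (placed.idxOf j) placed]
    rw [← List.getElem_cons_drop hnl, List.getElem_idxOf hnl]
  have hiq : i ∈ placed.drop (placed.idxOf j + 1) := by
    have hmem : i ∈ placed.take (placed.idxOf j) ++ j :: placed.drop (placed.idxOf j + 1) :=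
      hdec ▸ hip
    rcases List.mem_append.mp hmem with h | h
    · exfalso
      have hidx : placed.idxOf i < placed.idxOf j := by
        have : placed.idxOf i =
            (placed.take (placed.idxOf j) ++ j :: placed.drop (placed.idxOf j + 1)).idxOf i := by
          rw [← hdec]
        rw [List.idxOf_append, if_pos h] at this
        have hlt : (placed.take (placed.idxOf j)).idxOf i < (placed.take (placed.idxOf j)).length :=
          List.idxOf_lt_length_of_mem h
        have hlen : (placed.take (placed.idxOf j)).length = placed.idxOf j := by
          simp [List.length_take]; omega
        omega
      omega
    · rcases List.mem_cons.mp h with h' | h'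
      · exfalso; subst h'; omega
      · exact h'
  have hready : pvReadyP adj j (placed.drop (placed.idxOf j + 1) ++ []) :=
    pvOkSteps_middle adj _ j _ [] (hdec ▸ hok)
  have hij : i ≠ j := by intro h; subst h; omega
  exact hready i (by simpa using hiq) hij h1

theorem pvValidA_false (adj : List (List Int)) (k : Int) (placed : List Int) (v : Int) (σ rest remaining : List Int)
    (hperm : (placed ++ remaining).Perm (PySem.List.pyRange 0 k 1))
    (hvr : (v :: rest).Perm remaining) (hσ : σ.Perm rest)
    (hnr : ¬ pvReadyP adj v remaining) :
    pvValidA adj k (placed ++ v :: σ) = false := by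
  unfold pvReadyP at hnr
  push Not at hnr
  obtain ⟨u, hu, hune, hcell⟩ := hnr
  have hπr : (placed ++ v :: σ).Perm (PySem.List.pyRange 0 k 1) :=
    ((List.Perm.append_left placed ((hσ.cons v).trans hvr)).trans hperm)
  have hnd : (placed ++ v :: σ).Nodup := hπr.nodup_iff.mpr (PySem.List.nodup_pyRange_one 0 k)
  have huσ : u ∈ σ := by
    have : u ∈ v :: rest := hvr.mem_iff.mpr hu
    rcases List.mem_cons.mp this with h | h
    · exact absurd h hune
    · exact (hσ.mem_iff).mpr h
  have hvπ : v ∈ placed ++ v :: σ := by simp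
  have huπ : u ∈ placed ++ v :: σ := by simp [huσ]
  rw [Bool.eq_false_iff]
  intro ht
  rw [pvValidA_iff] at ht
  have hur : u ∈ PySem.List.pyRange 0 k 1 := hπr.mem_iff.mp huπ
  have hvr' : v ∈ PySem.List.pyRange 0 k 1 := hπr.mem_iff.mp hvπ
  refine ht u hur v hvr' ⟨by simpa using hcell, ?_⟩
  rw [pvPosD _ hnd u huπ, pvPosD _ hnd v hvπ]
  have h3 := (List.nodup_append.mp hnd).2.2
  have hvnp : v ∉ placed := fun h => h3 v h v (by simp) rfl
  have hunp : u ∉ placed := fun h => h3 u h u (by simp [huσ]) rfl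
  rw [List.idxOf_append, if_neg hunp, List.idxOf_append, if_neg hvnp,
    List.idxOf_cons_self, List.idxOf_cons_ne _ (fun h => hune h.symm)]
  push_cast [Nat.succ_eq_add_one]
  omega

-- the two mask computations agree on full-length orders
theorem pvMaskOf_eq (adj : List (List Int)) (k : Int) (perm : List Int)
    (hl : perm.length = (PySem.List.pyRange 0 k 1).length) :
    pvMaskOf adj perm = (pvMaskA adj k perm).1 := by
  unfold pvMaskOf pvMaskA
  have hlen : perm.length = k.toNat := by
    rw [hl, PySem.List.length_pyRange_one]; simp
  by_cases hk : 0 < k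
  · have hnk : ((perm.length : Int)) = k := by
      rw [hlen]; exact Int.toNat_of_nonneg hk.le
    simp only [hnk]
  · have h0 : perm.length = 0 := by omega
    simp only [h0, Nat.cast_zero]
    rw [PySem.List.pyRange_one_eq_nil (by omega : (0:Int) - 1 ≤ 0),
      PySem.List.pyRange_one_eq_nil (by omega : k - 1 ≤ 0)]
    rfl

theorem pvStepA_invalid (adj : List (List Int)) (k : Int) (π : List Int)
    (h : pvValidA adj k π = false) : ∀ acc, pvStepA adj k acc π = acc := by
  intro acc; simp [pvStepA, h]

theorem pvStepA_leaf (adj : List (List Int)) (k : Int) (placed : List Int) (best : Int)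
    (hv : pvValidA adj k placed = true)
    (hl : placed.length = (PySem.List.pyRange 0 k 1).length) :
    pvStepA adj k best placed =
      (if pvMaskOf adj placed > best then pvMaskOf adj placed else best) := by
  simp only [pvStepA, hv, Bool.not_true, Bool.false_eq_true, if_false, pvMaskOf_eq adj k placed hl]

theorem pvFoldl_attach {α β : Type} (l : List α) (f : β → α → β) (b : β) :
    l.attach.foldl (fun b x => f b x.1) b = l.foldl f b := by
  conv_rhs => rw [← List.attach_map_subtype_val l]
  rw [List.foldl_map]

theorem pvFlatMap_attach {α β : Type} (l : List α) (g : α → List β) :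
    l.attach.flatMap (fun x => g x.1) = l.flatMap g := by
  conv_rhs => rw [← List.attach_map_subtype_val l]
  rw [List.flatMap_map]

theorem pvGo_cons (adj : List (List Int)) (placed : List Int) (x : Int) (xs : List Int) (best : Int) :
    pvGo adj placed (x :: xs) best =
      (pvSelects (x :: xs)).foldl
        (fun b q => if pvReady adj q.1 (x :: xs) then pvGo adj (placed ++ [q.1]) q.2 b else b) best := by
  rw [pvGo, if_neg (List.cons_ne_nil x xs)]
  exact pvFoldl_attach (pvSelects (x :: xs))
    (fun b q => if pvReady adj q.1 (x :: xs) then pvGo adj (placed ++ [q.1]) q.2 b else b) best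

-- main induction: pruned backtracking = fold of A's step over all completions
theorem pvMain (adj : List (List Int)) (k : Int) : ∀ (n : Nat) (remaining placed : List Int) (best : Int),
    remaining.length = n →
    (placed ++ remaining).Perm (PySem.List.pyRange 0 k 1) →
    pvOkSteps adj placed remaining →
    pvGo adj placed remaining best =
      ((pvPerms remaining).map (placed ++ ·)).foldl (fun b perm => pvStepA adj k b perm) best := by
  intro n
  induction n with
  | zero =>
    intro remaining placed best h0 hperm hok
    have hrnil : remaining = [] := List.length_eq_zero_iff.mp h0
    subst hrnil
    have hp : placed.Perm (PySem.List.pyRange 0 k 1) := by simpa using hperm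
    have hv := pvValidA_of_okSteps adj k placed hp hok
    rw [pvGo, if_pos rfl,
      show ((pvPerms ([] : List Int)).map (placed ++ ·)) = [placed] by simp [pvPerms],
      List.foldl_cons, List.foldl_nil, pvStepA_leaf adj k placed best hv hp.length_eq]
  | succ n ih =>
    intro remaining placed best hlen hperm hok
    have hne : remaining ≠ [] := by intro h; subst h; simp at hlen
    obtain ⟨x, xs, rfl⟩ := List.exists_cons_of_ne_nil hne
    rw [pvGo_cons, pvPerms, pvFlatMap_attach (pvSelects (x :: xs))
        (fun q => (pvPerms q.2).map (q.1 :: ·)),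
      List.map_flatMap, pvFoldl_flatMap]
    apply PySem.List.foldl_congr_mem
    intro b q hq
    have hsp := pvSelects_perm (x :: xs) q hq
    have hmm : ∀ u, u ∈ (q.1 :: q.2) ↔ u ∈ x :: xs := fun u => hsp.mem_iff
    have hcomp : ((placed ++ ·) ∘ (q.1 :: ·)) = ((placed ++ [q.1]) ++ ·) := by
      funext σ; simp
    by_cases hre : pvReady adj q.1 (x :: xs) = true
    · have hrp : pvReadyP adj q.1 (x :: xs) := (pvReady_iff adj q.1 (x :: xs)).mp hre
      have hql : q.2.length = n := by
        have h := pvSelects_length (x :: xs) q hq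
        omega
      have hperm' : ((placed ++ [q.1]) ++ q.2).Perm (PySem.List.pyRange 0 k 1) := by
        rw [List.append_assoc, List.singleton_append]
        exact (List.Perm.append_left placed hsp).trans hperm
      have hok' : pvOkSteps adj (placed ++ [q.1]) q.2 := by
        rw [pvOkSteps_append]
        exact ⟨(pvOkSteps_congr adj placed hmm).mpr hok,
          fun u hu hne' => hrp u ((hmm u).mp (List.mem_cons_of_mem _ hu)) hne'⟩
      rw [if_pos hre, ih q.2 (placed ++ [q.1]) b hql hperm' hok', List.map_map, hcomp]
    · have hnr : ¬ pvReadyP adj q.1 (x :: xs) :=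
        fun hp' => hre ((pvReady_iff adj q.1 (x :: xs)).mpr hp')
      rw [if_neg hre, List.map_map, hcomp, List.foldl_map]
      refine (pvFoldl_fix _ _ b ?_).symm
      intro σ hσ acc
      refine pvStepA_invalid adj k _ ?_ acc
      have := pvValidA_false adj k placed q.1 σ q.2 (x :: xs) hperm hsp
        (pvPerms_perm q.2 σ hσ) hnr
      simpa using this

-- ===== VERDICT (by name: the statement is the Claim_ definition above) =====
theorem canonical_representation_spec : Claim_equal_canonical_representation := by
  intro adj k _ _
  unfold Spec_canonical_representation canonical_representation canonical_representation_alt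
  have h := pvMain adj k (PySem.List.pyRange 0 k 1).length (PySem.List.pyRange 0 k 1) [] (-1) rfl (by simp) trivial
  simp only [List.nil_append] at h
  simp [h, List.map_id']
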